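-- pv_equiv track=rewrite | github.com/baba6688/AAA | AOO/H/H3/SystemUpgrader.py | _analyze_common_issues
-- ===== SOURCE A (Python) =====
-- from typing import Dict, List, Any, Optional, Tuple, Union
-- from collections import defaultdict, deque
--
-- def _analyze_common_issues(records: List[Dict[str, Any]]) -> Dict[str, int]:
--     """分析常见问题"""
--     issues = defaultdict(int)
--
--     for record in records:
--         issues_list = record["execution"].get("issues_encountered", [])
--         for issue in issues_list:
--             issue_type = issue.get("type", "unknown")
--             issues[issue_type] += 1
--
--     return dict(issues)
-- ===== SOURCE B (Python) =====
-- def _analyze_common_issues(records):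
--     """Flatten all issue types, then tally them by recursive partitioning:
--     split the list on its first element, emit that count, recurse on the rest."""
--     types = []
--     for record in records:
--         for issue in record["execution"].get("issues_encountered", []):
--             types.append(issue.get("type", "unknown"))
--
--     def tally(ts):
--         if not ts:
--             return {}
--         t = ts[0]
--         same = [x for x in ts if x == t]
--         rest = [x for x in ts if x != t]
--         result = {t: len(same)}
--         result.update(tally(rest))
--         return result
--
--     return tally(types)
-- ===== Notes on version B (the rewrite author's own statement) =====
-- stated objective: alternative
-- what changed: Replaces A's single-pass mutable counter dict with a quicksort-style recursive partition: the flattened type list is split on its first element, that partition's length becomes one count, and the remainder (all other types) is tallied recursively.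
import Mathlib
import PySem

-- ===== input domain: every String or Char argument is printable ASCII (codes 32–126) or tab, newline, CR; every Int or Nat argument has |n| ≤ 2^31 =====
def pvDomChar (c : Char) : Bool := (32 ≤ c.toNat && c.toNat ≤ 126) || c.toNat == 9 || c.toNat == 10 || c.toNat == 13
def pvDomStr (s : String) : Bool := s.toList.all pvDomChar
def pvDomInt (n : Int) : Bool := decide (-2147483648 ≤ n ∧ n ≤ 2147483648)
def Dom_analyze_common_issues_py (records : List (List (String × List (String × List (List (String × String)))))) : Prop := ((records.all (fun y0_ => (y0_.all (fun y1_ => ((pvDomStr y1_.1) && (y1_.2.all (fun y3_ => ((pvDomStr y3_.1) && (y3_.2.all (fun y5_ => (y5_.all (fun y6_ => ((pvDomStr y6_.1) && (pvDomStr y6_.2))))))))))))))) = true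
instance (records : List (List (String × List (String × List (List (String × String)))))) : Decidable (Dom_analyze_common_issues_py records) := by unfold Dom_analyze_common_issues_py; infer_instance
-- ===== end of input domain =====

-- B replaces A's mutable counter-dict loop by flatten-then-recursive-partition tallying (alternative decomposition, same result).

-- ===== PORT A =====
-- Transliteration of A: for each record, record["execution"] (hard lookup; KeyError excluded by Pre_,
-- where the lookup fails the port defaults to the empty dict — unclaimed region), .get("issues_encountered", []),
-- then issues[issue.get("type","unknown")] += 1 on a defaultdict(int); returns dict(issues) as items.
def analyze_common_issues_py (records : List (List (String × List (String × List (List (String × String)))))) : List (String × Int) :=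
  (records.foldl
    (fun (issues : PySem.Dict String Int) record =>
      let issues_list := PySem.Dict.getD (PySem.Dict.mk ((PySem.Dict.get? (PySem.Dict.mk record) "execution").getD [])) "issues_encountered" []
      issues_list.foldl
        (fun d issue => d.modify ((PySem.Dict.mk issue).getD "type" "unknown") 0 (· + 1)) issues)
    PySem.Dict.empty).items

-- ===== PORT B =====
-- Source B's inner helper tally: partition the list on its first element; since rest contains no t,
-- result.update(tally(rest)) only appends fresh keys, which is exactly the cons here.
def pvTally : List String → List (String × Int)
  | [] => []
  | t :: tl =>
    let same := (t :: tl).filter (fun x => x == t)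
    let rest := (t :: tl).filter (fun x => x != t)
    (t, (same.length : Int)) :: pvTally rest
termination_by ts => ts.length
decreasing_by
  simp only [List.filter_cons, bne_self_eq_false, if_neg (by decide : ¬(false = true)), List.length_cons]
  exact Nat.lt_succ_of_le (List.length_filter_le _ _)

def analyze_common_issues_py_alt (records : List (List (String × List (String × List (List (String × String)))))) : List (String × Int) :=
  let types := records.foldl
    (fun (acc : List String) record =>
      (PySem.Dict.getD (PySem.Dict.mk ((PySem.Dict.get? (PySem.Dict.mk record) "execution").getD [])) "issues_encountered" []).foldl
        (fun acc issue => acc ++ [(PySem.Dict.mk issue).getD "type" "unknown"]) acc)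
    []
  pvTally types

-- ===== PRECONDITION & SPEC =====
-- Pre_ excludes exactly the records missing the "execution" key, where Python A raises KeyError (B raises there too).
def Pre_analyze_common_issues_py (records : List (List (String × List (String × List (List (String × String)))))) : Prop :=
  (records.all (fun record => record.any (fun p => p.1 == "execution"))) = true
instance (records : List (List (String × List (String × List (List (String × String)))))) : Decidable (Pre_analyze_common_issues_py records) := by unfold Pre_analyze_common_issues_py; infer_instance

def pvWitness_analyze_common_issues_py : (List (List (String × List (String × List (List (String × String)))))) :=
  [[("execution", [("issues_encountered", [[("type", "timeout")], []])])]]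

def Spec_analyze_common_issues_py (records : List (List (String × List (String × List (List (String × String)))))) (out : List (String × Int)) : Prop := out = analyze_common_issues_py_alt records
instance (records : List (List (String × List (String × List (List (String × String)))))) (out : List (String × Int)) : Decidable (Spec_analyze_common_issues_py records out) := by unfold Spec_analyze_common_issues_py; infer_instance

-- ===== CLAIM (what is proved, stated in full; the proofs are below) =====
def Claim_equal_analyze_common_issues_py : Prop := ∀ (records : List (List (String × List (String × List (List (String × String)))))), Dom_analyze_common_issues_py records → Pre_analyze_common_issues_py records → Spec_analyze_common_issues_py records (analyze_common_issues_py records)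

-- ===== LEMMAS AND PROOFS =====

-- the per-record list of issue types (proof-side abbreviation for the flattening)
def pvTypesOf (record : List (String × List (String × List (List (String × String))))) : List String :=
  (PySem.Dict.getD (PySem.Dict.mk ((PySem.Dict.get? (PySem.Dict.mk record) "execution").getD [])) "issues_encountered" []).map
    (fun issue => (PySem.Dict.mk issue).getD "type" "unknown")

-- folding over a flatMap is the nested fold
theorem pv_foldl_flatMap {α β γ : Type} (l : List α) (f : α → List β) (g : γ → β → γ) (init : γ) :
    (l.flatMap f).foldl g init = l.foldl (fun acc x => (f x).foldl g acc) init := by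
  induction l generalizing init with
  | nil => simp
  | cons x xs ih => simp [List.foldl_append, ih]

-- appending one mapped element at a time is map
theorem pv_foldl_append_map {α β : Type} (l : List α) (f : α → β) (acc : List β) :
    l.foldl (fun acc x => acc ++ [f x]) acc = acc ++ l.map f := by
  induction l generalizing acc with
  | nil => simp
  | cons x xs ih => simp [ih]

theorem pv_A_eq_counter (records : List (List (String × List (String × List (List (String × String)))))) :
    analyze_common_issues_py records = (PySem.Dict.counter (records.flatMap pvTypesOf)).items := by
  unfold analyze_common_issues_py
  rw [PySem.Dict.counter_eq_foldl, pv_foldl_flatMap]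
  simp only [pvTypesOf, List.foldl_map]

theorem pv_B_flatten (records : List (List (String × List (String × List (List (String × String)))))) :
    analyze_common_issues_py_alt records = pvTally (records.flatMap pvTypesOf) := by
  unfold analyze_common_issues_py_alt
  have key : ∀ (rs : List (List (String × List (String × List (List (String × String)))))) (acc : List String),
      rs.foldl (fun acc record =>
        (PySem.Dict.getD (PySem.Dict.mk ((PySem.Dict.get? (PySem.Dict.mk record) "execution").getD [])) "issues_encountered" []).foldl
          (fun acc issue => acc ++ [(PySem.Dict.mk issue).getD "type" "unknown"]) acc) acc
      = acc ++ rs.flatMap pvTypesOf := by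
    intro rs
    induction rs with
    | nil => simp
    | cons r t ih =>
      intro acc
      rw [List.foldl_cons, pv_foldl_append_map, ih]
      simp [pvTypesOf]
  exact congrArg pvTally ((key records []).trans (List.nil_append _))

-- set(xs) commutes with filtering (induction from the right over xs)
theorem pv_ofList_filter (p : String → Bool) (xs : List String) :
    PySem.Set.ofList (xs.filter p) = (PySem.Set.ofList xs).filter p := by
  induction xs using List.reverseRecOn with
  | nil => rfl
  | append_singleton l x ih =>
    by_cases hp : p x = true
    · rw [List.filter_append, show List.filter p [x] = [x] by simp [hp],
        PySem.Set.ofList_append_singleton, PySem.Set.ofList_append_singleton,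
        PySem.Set.add_eq_ite, PySem.Set.add_eq_ite, ih]
      by_cases hm : x ∈ PySem.Set.ofList l
      · rw [if_pos (List.mem_filter.mpr ⟨hm, hp⟩), if_pos hm]
      · rw [if_neg (fun hc => hm (List.mem_filter.mp hc).1), if_neg hm, List.filter_append,
          show List.filter p [x] = [x] by simp [hp]]
    · rw [List.filter_append, show List.filter p [x] = [] by simp [hp], List.append_nil, ih,
        PySem.Set.ofList_append_singleton, PySem.Set.add_eq_ite]
      by_cases hm : x ∈ PySem.Set.ofList l
      · rw [if_pos hm]
      · rw [if_neg hm, List.filter_append, show List.filter p [x] = [] by simp [hp],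
          List.append_nil]

-- counting survives removal of other elements
theorem pv_count_filter_ne (t k : String) (xs : List String) (h : k ≠ t) :
    (xs.filter (fun x => x != t)).count k = xs.count k := by
  induction xs with
  | nil => rfl
  | cons x l ih =>
    by_cases hx : x = t
    · subst hx; simp [ih, Ne.symm h]
    · simp [hx, List.count_cons, ih]

-- the partition tally computes exactly Counter(xs).items()
theorem pv_tally_aux (n : Nat) : ∀ (xs : List String), xs.length ≤ n →
    pvTally xs = (PySem.Set.ofList xs).map (fun k => (k, (xs.count k : Int))) := by
  induction n with
  | zero =>
    intro xs h
    have : xs = [] := List.eq_nil_of_length_eq_zero (Nat.le_zero.mp h)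
    subst this; simp [pvTally]
  | succ n ih =>
    intro xs h
    match xs with
    | [] => simp [pvTally]
    | t :: tl =>
      rw [pvTally]
      have hrest : (t :: tl).filter (fun x => x != t) = tl.filter (fun x => x != t) := by
        simp
      have hlen : (tl.filter (fun x => x != t)).length ≤ n :=
        Nat.le_of_succ_le_succ (Nat.le_trans (Nat.succ_le_succ (List.length_filter_le _ _))
          (by simpa using h))
      rw [hrest, ih _ hlen, PySem.Set.ofList_cons]
      have hdiscard : PySem.Set.discard (PySem.Set.ofList tl) t
          = PySem.Set.ofList (tl.filter (fun x => x != t)) := by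
        rw [pv_ofList_filter]; rfl
      simp only [List.map_cons]
      congr 1
      · have : (List.filter (fun x => x == t) (t :: tl)).length = (t :: tl).count t :=
          (List.count_eq_length_filter).symm
        rw [this]
      · rw [← hdiscard]
        apply List.map_congr_left
        intro k hk
        have hk' : k ∈ PySem.Set.ofList (tl.filter (fun x => x != t)) := hdiscard ▸ hk
        have hne : k ≠ t := by
          have hmem : k ∈ tl.filter (fun x => x != t) := (PySem.Set.mem_ofList _ _).mp hk'
          simpa using (List.mem_filter.mp hmem).2
        rw [pv_count_filter_ne t k tl hne, List.count_cons]
        simp [Ne.symm hne]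

-- ===== VERDICT (by name: the statement is the Claim_ definition above) =====
theorem analyze_common_issues_py_spec : Claim_equal_analyze_common_issues_py := by
  intro records _ _
  unfold Spec_analyze_common_issues_py
  rw [pv_A_eq_counter, pv_B_flatten, PySem.Dict.items_counter, pv_tally_aux (records.flatMap pvTypesOf).length _ (Nat.le_refl _)]
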